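-- pv_equiv track=rewrite | github.com/hshwang1994/server-expoter | redfish-gather/library/redfish_gather.py | account_service_find_all_empty_slots
-- ===== SOURCE A (Python) =====
-- def account_service_find_all_empty_slots(accounts, skip_slot_ids=None):
--     """빈 슬롯 모두 (slot id 정렬). PATCH 1차 실패 시 다음 슬롯 retry 용."""
--     skip = set(skip_slot_ids or [])
--     empties = [
--         a for a in accounts
--         if str(a.get('id') or '') not in skip and not (a.get('username') or '')
--     ]
--     # id 가 숫자면 숫자 정렬, 아니면 문자열 정렬
--     def _key(a):
--         try:
--             return (0, int(a.get('id') or '0'))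
--         except (ValueError, TypeError):
--             return (1, str(a.get('id') or ''))
--     empties.sort(key=_key)
--     return empties
-- ===== SOURCE B (Python) =====
-- def account_service_find_all_empty_slots(accounts, skip_slot_ids=None):
--     """Same result as A: one pass filters empty slots and partitions them into a
--     numeric-id group and a string-id group; each group is sorted by its own
--     homogeneous key and the groups are concatenated (numeric first)."""
--     skip = set(skip_slot_ids or [])
--     nums, strs = [], []
--     for a in accounts:
--         sid = str(a.get('id') or '')
--         if sid in skip or (a.get('username') or ''):
--             continue
--         try:
--             nums.append((int(a.get('id') or '0'), a))
--         except (ValueError, TypeError):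
--             strs.append((sid, a))
--     nums.sort(key=lambda p: p[0])
--     strs.sort(key=lambda p: p[0])
--     return [a for _, a in nums] + [a for _, a in strs]
-- ===== Notes on version B (the rewrite author's own statement) =====
-- stated objective: alternative
-- what changed: Instead of one sort over a heterogeneous composite key (tag, int|str) computed per element, B does a single pass that filters and partitions empties into a numeric-id group and a string-id group, sorts each group with its own homogeneous key, and concatenates them.
import Mathlib
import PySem

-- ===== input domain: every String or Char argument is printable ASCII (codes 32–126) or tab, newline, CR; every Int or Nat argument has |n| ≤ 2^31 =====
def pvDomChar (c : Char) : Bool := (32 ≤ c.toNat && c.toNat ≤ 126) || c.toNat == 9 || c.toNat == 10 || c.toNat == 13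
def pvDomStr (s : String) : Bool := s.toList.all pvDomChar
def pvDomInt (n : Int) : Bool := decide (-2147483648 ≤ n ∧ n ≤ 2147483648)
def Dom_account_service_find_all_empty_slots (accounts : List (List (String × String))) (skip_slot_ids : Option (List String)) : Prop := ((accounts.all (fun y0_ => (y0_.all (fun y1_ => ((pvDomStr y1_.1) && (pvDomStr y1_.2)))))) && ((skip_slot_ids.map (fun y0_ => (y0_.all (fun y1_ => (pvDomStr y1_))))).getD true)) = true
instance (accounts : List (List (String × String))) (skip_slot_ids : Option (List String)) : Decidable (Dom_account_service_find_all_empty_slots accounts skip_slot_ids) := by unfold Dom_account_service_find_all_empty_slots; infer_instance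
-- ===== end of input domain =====

-- B replaces A's single stable sort on a heterogeneous (tag, int|str) composite key by a one-pass
-- filter-and-partition into a numeric-id group and a string-id group, each sorted with its own
-- homogeneous key and concatenated (objective: alternative decomposition, same asymptotic cost).


-- ===== PORT A =====
-- the heterogeneous Python sort key (0, int) / (1, str); tuples compare lexicographically
inductive AKey
  | num : Int → AKey
  | str : String → AKey
deriving DecidableEq, Repr

-- '<' on the key tuples: (0,_) < (1,_); within a tag compare the payload
def akeyLt : AKey → AKey → Bool
  | .num m, .num n => decide (m < n)
  | .num _, .str _ => true
  | .str _, .num _ => false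
  | .str s, .str t => decide (s < t)

-- _key(a): try (0, int(a.get('id') or '0')) except ValueError → (1, str(a.get('id') or ''))
def aKey (a : List (String × String)) : AKey :=
  let v := (PySem.Dict.get? ⟨a⟩ "id").getD ""       -- str(a.get('id') or '')
  match PySem.Int.ofStr? (if v = "" then "0" else v) with
  | some n => .num n
  | none => .str v

-- the list-comprehension filter: id not in skip and username falsy
def aEmptyPred (skip : PySem.Set String) (a : List (String × String)) : Bool :=
  !(PySem.Set.contains skip ((PySem.Dict.get? ⟨a⟩ "id").getD "")) &&
  ((PySem.Dict.get? ⟨a⟩ "username").getD "" == "")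

def account_service_find_all_empty_slots (accounts : List (List (String × String))) (skip_slot_ids : Option (List String)) : List (List (String × String)) :=
  let skip := PySem.Set.ofList (skip_slot_ids.getD [])
  let empties := accounts.filter (aEmptyPred skip)
  -- empties.sort(key=_key): a stable sort with a heterogeneous tuple key; PySem.List.sorted needs an
  -- LT instance on the key type, so we use its exact foldl/insertBy form
  -- (PySem.List.sorted_eq_foldl_insertBy) with the tuple order written out in akeyLt — exact for
  -- CPython's stable sort.
  empties.foldl (fun acc a => PySem.List.insertBy (fun x y => akeyLt (aKey x) (aKey y)) a acc) []

-- ===== PORT B =====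
-- loop body: skip non-empties, append (int id, a) to nums or (sid, a) to strs
def bStep (skip : PySem.Set String)
    (p : List (Int × List (String × String)) × List (String × List (String × String)))
    (a : List (String × String)) :
    List (Int × List (String × String)) × List (String × List (String × String)) :=
  let sid := (PySem.Dict.get? ⟨a⟩ "id").getD ""
  if PySem.Set.contains skip sid || !((PySem.Dict.get? ⟨a⟩ "username").getD "" == "") then p
  else
    match PySem.Int.ofStr? (if sid = "" then "0" else sid) with
    | some n => (p.1 ++ [(n, a)], p.2)
    | none => (p.1, p.2 ++ [(sid, a)])

def account_service_find_all_empty_slots_alt (accounts : List (List (String × String))) (skip_slot_ids : Option (List String)) : List (List (String × String)) :=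
  let skip := PySem.Set.ofList (skip_slot_ids.getD [])
  let groups := accounts.foldl (bStep skip) ([], [])
  (PySem.List.sorted groups.1 (fun p => p.1)).map (·.2) ++
  (PySem.List.sorted groups.2 (fun p => p.1)).map (·.2)

-- ===== PRECONDITION & SPEC =====
def Spec_account_service_find_all_empty_slots (accounts : List (List (String × String))) (skip_slot_ids : Option (List String)) (out : List (List (String × String))) : Prop := out = account_service_find_all_empty_slots_alt accounts skip_slot_ids
instance (accounts : List (List (String × String))) (skip_slot_ids : Option (List String)) (out : List (List (String × String))) : Decidable (Spec_account_service_find_all_empty_slots accounts skip_slot_ids out) := by unfold Spec_account_service_find_all_empty_slots; infer_instance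

-- ===== CLAIM (what is proved, stated in full; the proofs are below) =====
def Claim_equal_account_service_find_all_empty_slots : Prop := ∀ (accounts : List (List (String × String))) (skip_slot_ids : Option (List String)), Dom_account_service_find_all_empty_slots accounts skip_slot_ids → Spec_account_service_find_all_empty_slots accounts skip_slot_ids (account_service_find_all_empty_slots accounts skip_slot_ids)

-- ===== LEMMAS AND PROOFS =====

-- the numeric-partition projection: some (int(id), a) when the id parses as an int
def fN (a : List (String × String)) : Option (Int × List (String × String)) :=
  let v := (PySem.Dict.get? ⟨a⟩ "id").getD ""
  match PySem.Int.ofStr? (if v = "" then "0" else v) with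
  | some n => some (n, a)
  | none => none

-- the string-partition projection: some (sid, a) when the id does not parse as an int
def fS (a : List (String × String)) : Option (String × List (String × String)) :=
  let v := (PySem.Dict.get? ⟨a⟩ "id").getD ""
  match PySem.Int.ofStr? (if v = "" then "0" else v) with
  | some _ => none
  | none => some (v, a)

-- B's loop is: filter by aEmptyPred, then partition by fN / fS, appending at the end
lemma partition_foldl (skip : PySem.Set String) (l : List (List (String × String))) :
    ∀ xs ys, l.foldl (bStep skip) (xs, ys) =
      (xs ++ (l.filter (aEmptyPred skip)).filterMap fN,
       ys ++ (l.filter (aEmptyPred skip)).filterMap fS) := by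
  induction l with
  | nil => simp
  | cons a l ih =>
    intro xs ys
    simp only [List.foldl_cons, List.filter_cons]
    cases h1 : PySem.Set.contains skip ((PySem.Dict.get? ⟨a⟩ "id").getD "") with
    | true =>
      have hp : aEmptyPred skip a = false := by
        simp only [aEmptyPred, h1, Bool.not_true, Bool.false_and]
      have hb : bStep skip (xs, ys) a = (xs, ys) := by
        simp only [bStep, h1, Bool.true_or, if_true]
      rw [hb, hp]; simp [ih]
    | false =>
      cases h2 : ((PySem.Dict.get? ⟨a⟩ "username").getD "" == "") with
      | false =>
        have hp : aEmptyPred skip a = false := by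
          simp only [aEmptyPred, h2, Bool.and_false]
        have hb : bStep skip (xs, ys) a = (xs, ys) := by
          simp only [bStep, h1, h2, Bool.not_false, Bool.false_or, if_true]
        rw [hb, hp]; simp [ih]
      | true =>
        have hp : aEmptyPred skip a = true := by
          simp only [aEmptyPred, h1, h2, Bool.not_false, Bool.true_and]
        rw [hp]
        rcases h3 : PySem.Int.ofStr?
            (if (PySem.Dict.get? ⟨a⟩ "id").getD "" = "" then "0"
             else (PySem.Dict.get? ⟨a⟩ "id").getD "") with _ | n
        · have hb : bStep skip (xs, ys) a = (xs, ys ++ [((PySem.Dict.get? ⟨a⟩ "id").getD "", a)]) := by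
            simp only [bStep, h1, h2, Bool.not_true, Bool.or_false, h3]
            rw [if_neg Bool.false_ne_true]
          rw [if_pos rfl, hb, ih]
          simp [fN, fS, h3]
        · have hb : bStep skip (xs, ys) a = (xs ++ [(n, a)], ys) := by
            simp only [bStep, h1, h2, Bool.not_true, Bool.or_false, h3]
            rw [if_neg Bool.false_ne_true]
          rw [if_pos rfl, hb, ih]
          simp [fN, fS, h3]

-- inserting an element that sorts before all of SL only touches the NL-prefix
lemma insertBy_append_front (before : α → α → Bool) (x : α) (SL : List α)
    (hS : ∀ y ∈ SL, before x y = true) :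
    ∀ NL : List α, PySem.List.insertBy before x (NL ++ SL) =
      PySem.List.insertBy before x NL ++ SL := by
  intro NL
  induction NL with
  | nil =>
    cases SL with
    | nil => simp [PySem.List.insertBy]
    | cons y ys => simp [PySem.List.insertBy, hS y (by simp)]
  | cons z NL ih =>
    by_cases hz : before x z = true
    · simp [PySem.List.insertBy, hz]
    · simp only [Bool.not_eq_true] at hz
      simp [PySem.List.insertBy, hz, ih]

-- inserting an element that sorts after all of NL only touches the SL-suffix
lemma insertBy_append_back (before : α → α → Bool) (x : α) (SL : List α) :
    ∀ NL : List α, (∀ y ∈ NL, before x y = false) →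
      PySem.List.insertBy before x (NL ++ SL) = NL ++ PySem.List.insertBy before x SL := by
  intro NL
  induction NL with
  | nil => simp
  | cons z NL ih =>
    intro hN
    simp [PySem.List.insertBy, hN z (by simp), ih (fun y hy => hN y (by simp [hy]))]

-- mapping the pair projection through an insertion, when the comparisons agree through the map
lemma map_insertBy {α β : Type} (f : α → β) (bp : α → α → Bool) (ba : β → β → Bool) (x : α) :
    ∀ P : List α, (∀ p ∈ P, bp x p = ba (f x) (f p)) →
      (PySem.List.insertBy bp x P).map f = PySem.List.insertBy ba (f x) (P.map f) := by
  intro P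
  induction P with
  | nil => simp [PySem.List.insertBy]
  | cons p P ih =>
    intro h
    by_cases hp : bp x p = true
    · simp [PySem.List.insertBy, hp, ← h p (by simp)]
    · simp only [Bool.not_eq_true] at hp
      simp [PySem.List.insertBy, hp, ← h p (by simp),
            ih (fun q hq => h q (by simp [hq]))]

-- the heart: A's insertion sort with the composite key, run on a numeric block followed by a
-- string block, is the two per-group insertion sorts glued together
lemma main_sort (E : List (List (String × String))) :
    ∀ (Pn : List (Int × List (String × String))) (Ps : List (String × List (String × String))),
      (∀ p ∈ Pn, aKey p.2 = AKey.num p.1) → (∀ p ∈ Ps, aKey p.2 = AKey.str p.1) →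
      E.foldl (fun acc a => PySem.List.insertBy (fun x y => akeyLt (aKey x) (aKey y)) a acc)
          (Pn.map (·.2) ++ Ps.map (·.2)) =
        ((E.filterMap fN).foldl
            (fun acc p => PySem.List.insertBy (fun p q => decide (p.1 < q.1)) p acc) Pn).map (·.2) ++
        ((E.filterMap fS).foldl
            (fun acc p => PySem.List.insertBy (fun p q => decide (p.1 < q.1)) p acc) Ps).map (·.2) := by
  induction E with
  | nil => simp
  | cons a E ih =>
    intro Pn Ps hPn hPs
    rcases h3 : PySem.Int.ofStr?
        (if (PySem.Dict.get? ⟨a⟩ "id").getD "" = "" then "0"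
         else (PySem.Dict.get? ⟨a⟩ "id").getD "") with _ | n
    · -- string case
      have hk : aKey a = AKey.str ((PySem.Dict.get? ⟨a⟩ "id").getD "") := by
        simp [aKey, h3]
      have hfN : fN a = none := by simp [fN, h3]
      have hfS : fS a = some ((PySem.Dict.get? ⟨a⟩ "id").getD "", a) := by simp [fS, h3]
      simp only [List.foldl_cons, List.filterMap_cons, hfN, hfS]
      rw [insertBy_append_back _ _ _ _ (by
            intro y hy
            rcases List.mem_map.mp hy with ⟨p, hp, rfl⟩
            simp [hk, hPn p hp, akeyLt])]
      rw [← map_insertBy (·.2) (fun p q => decide (p.1 < q.1))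
            (fun x y => akeyLt (aKey x) (aKey y))
            ((PySem.Dict.get? ⟨a⟩ "id").getD "", a) Ps (by
          intro p hp
          simp [hk, hPs p hp, akeyLt])]
      exact ih Pn _ hPn (by
        intro p hp
        rcases (PySem.List.mem_insertBy _ _ _ _).mp hp with h | h
        · subst h; exact hk
        · exact hPs p h)
    · -- numeric case
      have hk : aKey a = AKey.num n := by simp [aKey, h3]
      have hfN : fN a = some (n, a) := by simp [fN, h3]
      have hfS : fS a = none := by simp [fS, h3]
      simp only [List.foldl_cons, List.filterMap_cons, hfN, hfS]
      rw [insertBy_append_front _ _ _ (by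
            intro y hy
            rcases List.mem_map.mp hy with ⟨p, hp, rfl⟩
            simp [hk, hPs p hp, akeyLt])]
      rw [← map_insertBy (·.2) (fun p q => decide (p.1 < q.1))
            (fun x y => akeyLt (aKey x) (aKey y)) (n, a) Pn (by
          intro p hp
          simp [hk, hPn p hp, akeyLt])]
      exact ih _ Ps (by
        intro p hp
        rcases (PySem.List.mem_insertBy _ _ _ _).mp hp with h | h
        · subst h; exact hk
        · exact hPn p h) hPs

-- ===== VERDICT (by name: the statement is the Claim_ definition above) =====
theorem account_service_find_all_empty_slots_spec : Claim_equal_account_service_find_all_empty_slots := by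
  intro accounts skip_slot_ids _
  unfold Spec_account_service_find_all_empty_slots
  simp only [account_service_find_all_empty_slots, account_service_find_all_empty_slots_alt]
  rw [partition_foldl, PySem.List.sorted_eq_foldl_insertBy, PySem.List.sorted_eq_foldl_insertBy]
  have h := main_sort (accounts.filter (aEmptyPred (PySem.Set.ofList (skip_slot_ids.getD []))))
    [] [] (by simp) (by simp)
  simp only [List.map_nil, List.nil_append] at h
  exact h
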